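-- pv_equiv track=rewrite | github.com/martinjlmlforks/PathMates | clustering-service/clustering-service.py | trajs_by_cluster
-- ===== SOURCE A (Python) =====
-- def trajs_by_cluster(traj_lst, cluster_lst):
--     trajectories = {}
--     counting_of_trajs = {}
--     indexes_of_trajs = {}
--     index = 0
--     for traj, cluster in zip(traj_lst, cluster_lst):
--         if cluster in trajectories:
--             trajectories[cluster].append(traj)
--             counting_of_trajs[cluster] = counting_of_trajs[cluster] + 1
--             indexes_of_trajs[cluster].append(index)
--         else:
--             trajectories[cluster] = [traj]
--             counting_of_trajs[cluster] = 1
--             indexes_of_trajs[cluster] = [index]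
--         index = index + 1
--     return trajectories, counting_of_trajs, indexes_of_trajs
-- ===== SOURCE B (Python) =====
-- def trajs_by_cluster(traj_lst, cluster_lst):
--     pairs = list(zip(traj_lst, cluster_lst))
--     clusters = [c for _, c in pairs]
--     seen = list(dict.fromkeys(clusters))
--     trajectories = {c: [t for t, cc in pairs if cc == c] for c in seen}
--     counting_of_trajs = {c: clusters.count(c) for c in seen}
--     indexes_of_trajs = {c: [i for i, cc in enumerate(clusters) if cc == c] for c in seen}
--     return trajectories, counting_of_trajs, indexes_of_trajs
-- ===== Notes on version B (the rewrite author's own statement) =====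
-- stated objective: alternative
-- what changed: B replaces A's single-pass incremental dict-building (branch on membership, append, counter increment) with a two-phase algorithm: first compute the ordered distinct clusters, then build each output dict by a separate whole-list filter/count scan per cluster (O(n*k) repeated filtering instead of O(n) hash grouping).
import Mathlib
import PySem

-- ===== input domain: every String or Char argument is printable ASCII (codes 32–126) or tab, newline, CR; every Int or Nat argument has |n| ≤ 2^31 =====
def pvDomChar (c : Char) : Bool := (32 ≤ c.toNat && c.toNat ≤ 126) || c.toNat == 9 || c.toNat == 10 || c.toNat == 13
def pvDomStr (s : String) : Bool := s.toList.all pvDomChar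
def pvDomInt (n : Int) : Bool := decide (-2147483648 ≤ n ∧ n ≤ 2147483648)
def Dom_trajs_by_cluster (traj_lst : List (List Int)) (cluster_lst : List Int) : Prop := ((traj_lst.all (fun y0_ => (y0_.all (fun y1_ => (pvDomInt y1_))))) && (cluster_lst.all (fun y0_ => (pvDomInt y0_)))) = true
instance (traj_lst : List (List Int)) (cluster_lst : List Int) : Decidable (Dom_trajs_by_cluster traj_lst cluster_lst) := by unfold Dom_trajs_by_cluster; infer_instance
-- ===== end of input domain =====

-- B replaces A's single-pass incremental dict building with a two-phase algorithm:
-- ordered distinct clusters first, then one whole-list filter/count scan per cluster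
-- (alternative decomposition; return values proved equal).


-- ===== PORT A =====
-- A's loop state: (trajectories, counting_of_trajs, indexes_of_trajs, index)
def trajs_by_cluster_stepA
    (s : PySem.Dict Int (List (List Int)) × PySem.Dict Int Int × PySem.Dict Int (List Int) × Int)
    (p : List Int × Int) :
    PySem.Dict Int (List (List Int)) × PySem.Dict Int Int × PySem.Dict Int (List Int) × Int :=
  let (t, c, i, idx) := s
  if t.contains p.2 then
    (t.modify p.2 [] (· ++ [p.1]), c.modify p.2 0 (· + 1), i.modify p.2 [] (· ++ [idx]), idx + 1)
  else
    (t.insert p.2 [p.1], c.insert p.2 1, i.insert p.2 [idx], idx + 1)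

def trajs_by_cluster (traj_lst : List (List Int)) (cluster_lst : List Int) :
    (List (Int × List (List Int))) × (List (Int × Int)) × (List (Int × List Int)) :=
  let r := (traj_lst.zip cluster_lst).foldl trajs_by_cluster_stepA
             (PySem.Dict.empty, PySem.Dict.empty, PySem.Dict.empty, 0)
  (r.1.items, r.2.1.items, r.2.2.1.items)

-- ===== PORT B =====
def trajs_by_cluster_alt (traj_lst : List (List Int)) (cluster_lst : List Int) :
    (List (Int × List (List Int))) × (List (Int × Int)) × (List (Int × List Int)) :=
  let pairs := traj_lst.zip cluster_lst
  let clusters := pairs.map (·.2)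
  let seen := PySem.List.dedup clusters
  let t := seen.foldl (fun d c =>
             d.insert c ((pairs.filter (fun p => p.2 == c)).map (·.1))) PySem.Dict.empty
  let cnt := seen.foldl (fun d c =>
             d.insert c ((clusters.count c : Int))) PySem.Dict.empty
  let ix := seen.foldl (fun d c =>
             d.insert c (((PySem.List.enumerate clusters 0).filter (fun q => q.2 == c)).map (·.1))) PySem.Dict.empty
  (t.items, cnt.items, ix.items)

-- ===== PRECONDITION & SPEC =====
def Spec_trajs_by_cluster (traj_lst : List (List Int)) (cluster_lst : List Int) (out : (List (Int × List (List Int))) × (List (Int × Int)) × (List (Int × List Int))) : Prop := out = trajs_by_cluster_alt traj_lst cluster_lst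
instance (traj_lst : List (List Int)) (cluster_lst : List Int) (out : (List (Int × List (List Int))) × (List (Int × Int)) × (List (Int × List Int))) : Decidable (Spec_trajs_by_cluster traj_lst cluster_lst out) := by unfold Spec_trajs_by_cluster; infer_instance

-- ===== CLAIM (what is proved, stated in full; the proofs are below) =====
def Claim_equal_trajs_by_cluster : Prop := ∀ (traj_lst : List (List Int)) (cluster_lst : List Int), Dom_trajs_by_cluster traj_lst cluster_lst → Spec_trajs_by_cluster traj_lst cluster_lst (trajs_by_cluster traj_lst cluster_lst)

-- ===== LEMMAS AND PROOFS =====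

-- A's branch on membership is exactly an unconditional modify on each dict component
theorem stepA_eq_modify
    (t : PySem.Dict Int (List (List Int))) (c : PySem.Dict Int Int)
    (i : PySem.Dict Int (List Int)) (idx : Int) (p : List Int × Int)
    (hc : c.contains p.2 = t.contains p.2) (hi : i.contains p.2 = t.contains p.2) :
    trajs_by_cluster_stepA (t, c, i, idx) p
      = (t.modify p.2 [] (· ++ [p.1]), c.modify p.2 0 (· + 1),
         i.modify p.2 [] (· ++ [idx]), idx + 1) := by
  by_cases h : t.contains p.2 = true
  · simp [trajs_by_cluster_stepA, h]
  · have h' : t.contains p.2 = false := by simpa using h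
    have et : t.modify p.2 [] (· ++ [p.1]) = t.insert p.2 [p.1] := by
      show t.insert p.2 (t.getD p.2 [] ++ [p.1]) = _
      rw [PySem.Dict.getD_of_not_contains _ _ h']; rfl
    have ec : c.modify p.2 0 (· + 1) = c.insert p.2 1 := by
      show c.insert p.2 (c.getD p.2 0 + 1) = _
      rw [PySem.Dict.getD_of_not_contains _ _ (hc.trans h')]; rfl
    have ei : i.modify p.2 [] (· ++ [idx]) = i.insert p.2 [idx] := by
      show i.insert p.2 (i.getD p.2 [] ++ [idx]) = _
      rw [PySem.Dict.getD_of_not_contains _ _ (hi.trans h')]; rfl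
    simp [trajs_by_cluster_stepA, h', et, ec, ei]

-- A's coupled fold splits into three independent modify-folds
theorem A_fold_split (l : List (List Int × Int))
    (t : PySem.Dict Int (List (List Int))) (c : PySem.Dict Int Int)
    (i : PySem.Dict Int (List Int)) (idx : Int)
    (hkc : c.keys = t.keys) (hki : i.keys = t.keys) :
    l.foldl trajs_by_cluster_stepA (t, c, i, idx)
      = (l.foldl (fun d p => d.modify p.2 [] (· ++ [p.1])) t,
         l.foldl (fun d p => d.modify p.2 0 (· + 1)) c,
         (PySem.List.enumerate l idx).foldl (fun d q => d.modify q.2.2 [] (· ++ [q.1])) i,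
         idx + (l.length : Int)) := by
  induction l generalizing t c i idx with
  | nil => simp [PySem.List.enumerate_nil]
  | cons p l ih =>
    have hcc : c.contains p.2 = t.contains p.2 := by
      rw [PySem.Dict.contains_eq_decide_mem_keys, PySem.Dict.contains_eq_decide_mem_keys, hkc]
    have hic : i.contains p.2 = t.contains p.2 := by
      rw [PySem.Dict.contains_eq_decide_mem_keys, PySem.Dict.contains_eq_decide_mem_keys, hki]
    rw [List.foldl_cons, stepA_eq_modify t c i idx p hcc hic, PySem.List.enumerate_cons]
    rw [ih _ _ _ _ ?kc ?ki]
    case kc =>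
      by_cases h : t.contains p.2 = true
      · rw [PySem.Dict.keys_modify, PySem.Dict.keys_modify,
            PySem.Dict.keys_insert_of_contains _ _ (hcc.trans h),
            PySem.Dict.keys_insert_of_contains _ _ h, hkc]
      · have h' : t.contains p.2 = false := by simpa using h
        rw [PySem.Dict.keys_modify, PySem.Dict.keys_modify,
            PySem.Dict.keys_insert_of_not_contains _ _ (hcc.trans h'),
            PySem.Dict.keys_insert_of_not_contains _ _ h', hkc]
    case ki =>
      by_cases h : t.contains p.2 = true
      · rw [PySem.Dict.keys_modify, PySem.Dict.keys_modify,
            PySem.Dict.keys_insert_of_contains _ _ (hic.trans h),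
            PySem.Dict.keys_insert_of_contains _ _ h, hki]
      · have h' : t.contains p.2 = false := by simpa using h
        rw [PySem.Dict.keys_modify, PySem.Dict.keys_modify,
            PySem.Dict.keys_insert_of_not_contains _ _ (hic.trans h'),
            PySem.Dict.keys_insert_of_not_contains _ _ h', hki]
    refine Prod.ext rfl (Prod.ext rfl (Prod.ext rfl ?_))
    simp; ring


theorem enumerate_map_snd (xs : List (List Int × Int)) (s : Int) :
    PySem.List.enumerate (xs.map (·.2)) s = (PySem.List.enumerate xs s).map (fun q => (q.1, q.2.2)) := by
  induction xs generalizing s with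
  | nil => simp [PySem.List.enumerate_nil]
  | cons x xs ih => simp [PySem.List.enumerate_cons, ih]

-- the trajectories component
theorem items_T (pairs : List (List Int × Int)) :
    (pairs.foldl (fun d p => d.modify p.2 [] (· ++ [p.1])) PySem.Dict.empty).items
    = ((PySem.List.dedup (pairs.map (·.2))).foldl (fun d c =>
         d.insert c ((pairs.filter (fun p => p.2 == c)).map (·.1))) PySem.Dict.empty).items := by
  rw [PySem.Dict.items_foldl_insert_fresh _ (fun c => c) _ _
        (fun a _ => PySem.Dict.contains_empty a) (by simp)]
  have hk : (pairs.foldl (fun d p => d.modify p.2 [] (· ++ [p.1])) PySem.Dict.empty).keys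
      = PySem.Set.ofList (pairs.map (·.2)) := by
    rw [PySem.Dict.keys_foldl_modify_key pairs (·.2) [] (fun _ p => (· ++ [p.1]))]
    simp [PySem.Set.update, PySem.Set.ofList, PySem.Dict.keys_empty]
  have hg : ∀ c, (pairs.foldl (fun d p => d.modify p.2 [] (· ++ [p.1])) PySem.Dict.empty).getD c []
      = (pairs.filter (fun p => p.2 == c)).map (·.1) := by
    intro c
    rw [show pairs.foldl (fun d p => d.modify p.2 [] (· ++ [p.1])) PySem.Dict.empty
        = (pairs.map (fun p => (p.2, p.1))).foldl (fun d q => d.modify q.1 [] (· ++ [q.2])) PySem.Dict.empty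
        from by simp [List.foldl_map],
       PySem.Dict.getD_foldl_modify_append]
    simp [List.filter_map, Function.comp_def, PySem.Dict.getD_empty]
  rw [PySem.Dict.items_eq_map_keys _ (hk ▸ PySem.Set.nodup_ofList _) [], hk]
  simp only [PySem.List.dedup_eq_ofList]
  rw [show (PySem.Dict.empty : PySem.Dict Int _).items = [] from rfl, List.nil_append]
  exact List.map_congr_left (fun c _ => by rw [hg c])

-- the counting component
theorem items_C (pairs : List (List Int × Int)) :
    (pairs.foldl (fun d p => d.modify p.2 0 (· + 1)) PySem.Dict.empty).items
    = ((PySem.List.dedup (pairs.map (·.2))).foldl (fun d c =>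
         d.insert c (((pairs.map (·.2)).count c : Int))) PySem.Dict.empty).items := by
  rw [PySem.Dict.items_foldl_insert_fresh _ (fun c => c) _ _
        (fun a _ => PySem.Dict.contains_empty a) (by simp)]
  have e : pairs.foldl (fun d p => d.modify p.2 0 (· + 1)) (PySem.Dict.empty : PySem.Dict Int Int)
      = PySem.Dict.counter (pairs.map (·.2)) := by
    rw [PySem.Dict.counter_eq_foldl]
    simp [List.foldl_map]
  rw [e]
  simp only [PySem.Dict.items_counter, PySem.List.dedup_eq_ofList]
  rw [show (PySem.Dict.empty : PySem.Dict Int Int).items = [] from rfl, List.nil_append]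

-- the indexes component
theorem items_I (pairs : List (List Int × Int)) :
    ((PySem.List.enumerate pairs 0).foldl (fun d q => d.modify q.2.2 [] (· ++ [q.1])) PySem.Dict.empty).items
    = ((PySem.List.dedup (pairs.map (·.2))).foldl (fun d c =>
         d.insert c (((PySem.List.enumerate (pairs.map (·.2)) 0).filter (fun q => q.2 == c)).map (·.1))) PySem.Dict.empty).items := by
  rw [PySem.Dict.items_foldl_insert_fresh _ (fun c => c) _ _
        (fun a _ => PySem.Dict.contains_empty a) (by simp)]
  have hk : ((PySem.List.enumerate pairs 0).foldl (fun d q => d.modify q.2.2 [] (· ++ [q.1])) PySem.Dict.empty).keys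
      = PySem.Set.ofList (pairs.map (·.2)) := by
    rw [PySem.Dict.keys_foldl_modify_key (PySem.List.enumerate pairs 0) (fun q => q.2.2) [] (fun _ q => (· ++ [q.1]))]
    have : (PySem.List.enumerate pairs 0).map (fun q => q.2.2) = pairs.map (·.2) := by
      rw [show (fun (q : Int × (List Int × Int)) => q.2.2) = (fun (p : List Int × Int) => p.2) ∘ (fun q => q.2)
          from rfl, ← List.map_map, PySem.List.map_snd_enumerate]
    rw [this]
    simp [PySem.Set.update, PySem.Set.ofList, PySem.Dict.keys_empty]
  have hg : ∀ c, ((PySem.List.enumerate pairs 0).foldl (fun d q => d.modify q.2.2 [] (· ++ [q.1])) PySem.Dict.empty).getD c []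
      = ((PySem.List.enumerate (pairs.map (·.2)) 0).filter (fun q => q.2 == c)).map (·.1) := by
    intro c
    rw [show (PySem.List.enumerate pairs 0).foldl (fun d q => d.modify q.2.2 [] (· ++ [q.1])) PySem.Dict.empty
        = ((PySem.List.enumerate pairs 0).map (fun q => (q.2.2, q.1))).foldl (fun d q => d.modify q.1 [] (· ++ [q.2])) PySem.Dict.empty
        from by simp [List.foldl_map],
       PySem.Dict.getD_foldl_modify_append, enumerate_map_snd]
    simp [List.filter_map, Function.comp_def, PySem.Dict.getD_empty]
  rw [PySem.Dict.items_eq_map_keys _ (hk ▸ PySem.Set.nodup_ofList _) [], hk]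
  simp only [PySem.List.dedup_eq_ofList]
  rw [show (PySem.Dict.empty : PySem.Dict Int _).items = [] from rfl, List.nil_append]
  exact List.map_congr_left (fun c _ => by rw [hg c])

-- ===== VERDICT (by name: the statement is the Claim_ definition above) =====
theorem trajs_by_cluster_spec : Claim_equal_trajs_by_cluster := by
  intro traj_lst cluster_lst _
  unfold Spec_trajs_by_cluster trajs_by_cluster trajs_by_cluster_alt
  simp only []
  rw [A_fold_split _ _ _ _ _ rfl rfl]
  exact Prod.ext (items_T _) (Prod.ext (items_C _) (items_I _))
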